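-- pv_equiv track=rewrite | github.com/Coding-Algorithm-for-the-Last-time/Today-I-solved | 07_02_Greedy/96_2_Maximize_the_Topmost_Element_After_K_Moves/teacher-kiwi.py | maximumTop
-- ===== SOURCE A (Python) =====
-- def maximumTop(nums: list[int], k: int) -> int:
--     if len(nums) == 1:
--         if k % 2 == 1:
--             return -1
--         else:
--             return nums[0]
--
--     if k < 2:
--         return nums[k]
--
--     max_num_index = 0
--     for i in range(len(nums[:k])):
--         if nums[i] > nums[max_num_index]:
--             max_num_index = i
--
--     if max_num_index + 1 == k:
--         if len(nums) > k:
--             return max(max(nums[0 : k - 1]), nums[k])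
--         return max(nums[0 : k - 1])
--     return max(nums[0 : k + 1])
-- ===== SOURCE B (Python) =====
-- def maximumTop(nums: list[int], k: int) -> int:
--     if len(nums) == 1:
--         return -1 if k % 2 == 1 else nums[0]
--     if k < 2:
--         return nums[k]
--     best = max(nums[0 : k - 1])
--     if k < len(nums):
--         best = max(best, nums[k])
--     return best
-- ===== Notes on version B (the rewrite author's own statement) =====
-- stated objective: simpler
-- what changed: B drops A's first-argmax index loop and the three-way positional branch on max_num_index+1==k entirely, replacing them with a single max over nums[0:k-1] plus an optional comparison with nums[k].
import Mathlib
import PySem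

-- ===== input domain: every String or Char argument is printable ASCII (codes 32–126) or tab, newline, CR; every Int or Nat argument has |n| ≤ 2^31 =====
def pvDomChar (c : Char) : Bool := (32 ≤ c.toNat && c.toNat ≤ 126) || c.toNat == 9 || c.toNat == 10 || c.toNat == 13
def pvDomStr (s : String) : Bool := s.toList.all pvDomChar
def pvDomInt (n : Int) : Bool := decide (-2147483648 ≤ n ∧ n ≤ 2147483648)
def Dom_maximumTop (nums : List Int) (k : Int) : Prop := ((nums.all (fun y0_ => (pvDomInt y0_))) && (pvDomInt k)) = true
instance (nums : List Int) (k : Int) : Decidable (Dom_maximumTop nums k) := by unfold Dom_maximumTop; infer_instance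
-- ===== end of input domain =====

-- B replaces A's first-argmax index loop and its three-way positional branch with one max over
-- nums[0:k-1] plus an optional comparison with nums[k] (objective: simpler; same O(n) cost).

-- ===== PORT A =====
def maximumTop (nums : List Int) (k : Int) : Int :=
  if nums.length = 1 then
    if PySem.Int.mod k 2 = 1 then -1 else PySem.List.pyGetD nums 0 0
  else if k < 2 then
    PySem.List.pyGetD nums k 0
  else
    let mi := (PySem.List.pyRange 0 ((PySem.List.slice nums none (some k)).length : Int) 1).foldl
      (fun m i => if PySem.List.pyGetD nums i 0 > PySem.List.pyGetD nums m 0 then i else m) 0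
    if mi + 1 = k then
      if (nums.length : Int) > k then
        max ((PySem.List.max? (PySem.List.slice nums (some 0) (some (k - 1))) (fun x => x)).getD 0)
            (PySem.List.pyGetD nums k 0)
      else
        (PySem.List.max? (PySem.List.slice nums (some 0) (some (k - 1))) (fun x => x)).getD 0
    else
      (PySem.List.max? (PySem.List.slice nums (some 0) (some (k + 1))) (fun x => x)).getD 0

-- ===== PORT B =====
def maximumTop_alt (nums : List Int) (k : Int) : Int :=
  if nums.length = 1 then
    if PySem.Int.mod k 2 = 1 then -1 else PySem.List.pyGetD nums 0 0
  else if k < 2 then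
    PySem.List.pyGetD nums k 0
  else
    let best := (PySem.List.max? (PySem.List.slice nums (some 0) (some (k - 1))) (fun x => x)).getD 0
    if k < (nums.length : Int) then max best (PySem.List.pyGetD nums k 0) else best

-- ===== PRECONDITION & SPEC =====
-- Pre_ excludes exactly the inputs where A raises: the empty list (IndexError/ValueError)
-- and, when len(nums) ≥ 2 and k < 2, an index k outside Python's range (IndexError).
def Pre_maximumTop (nums : List Int) (k : Int) : Prop :=
  nums ≠ [] ∧ (nums.length = 1 ∨ 2 ≤ k ∨ (-(nums.length : Int) ≤ k ∧ k < (nums.length : Int)))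
instance (nums : List Int) (k : Int) : Decidable (Pre_maximumTop nums k) := by
  unfold Pre_maximumTop; infer_instance

def pvWitness_maximumTop : List Int × Int := ([3, 1, 4, 1, 5], 3)

def Spec_maximumTop (nums : List Int) (k : Int) (out : Int) : Prop := out = maximumTop_alt nums k
instance (nums : List Int) (k : Int) (out : Int) : Decidable (Spec_maximumTop nums k out) := by
  unfold Spec_maximumTop; infer_instance

-- ===== CLAIM (what is proved, stated in full; the proofs are below) =====
def Claim_equal_maximumTop : Prop := ∀ (nums : List Int) (k : Int), Dom_maximumTop nums k → Pre_maximumTop nums k → Spec_maximumTop nums k (maximumTop nums k)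

-- ===== LEMMAS AND PROOFS =====

-- max(l) as both ports use it
def pvM (l : List Int) : Int := (PySem.List.max? l (fun x => x)).getD 0

lemma pvM_mem {l : List Int} (h : l ≠ []) : pvM l ∈ l := by
  unfold pvM
  cases hm : PySem.List.max? l (fun x => x) with
  | none => exact absurd ((PySem.List.max?_eq_none_iff l (fun x => x)).mp hm) h
  | some m => simpa using PySem.List.max?_mem hm

lemma pvM_le {l : List Int} {y : Int} (hy : y ∈ l) : y ≤ pvM l := by
  unfold pvM
  cases hm : PySem.List.max? l (fun x => x) with
  | none => exact absurd hy (by simp [(PySem.List.max?_eq_none_iff l (fun x => x)).mp hm])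
  | some m => simpa using PySem.List.max?_isMax hm y hy

-- the argmax loop of A: result index and its domination property
lemma argmax_spec (nums : List Int) :
    ∀ t : Nat, 0 < t →
    ∃ mn : Nat,
      (PySem.List.pyRange 0 (t : Int) 1).foldl
        (fun m i => if PySem.List.pyGetD nums i 0 > PySem.List.pyGetD nums m 0 then i else m) 0
        = (mn : Int) ∧ mn < t ∧
      ∀ j : Nat, j < t → nums.getD j 0 ≤ nums.getD mn 0 := by
  intro t
  induction t with
  | zero => intro h; omega
  | succ t ih =>
    intro _
    by_cases ht : 0 < t
    · obtain ⟨mn, hfold, hlt, hdom⟩ := ih ht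
      have hsplit : PySem.List.pyRange 0 ((t : Int) + 1) 1
          = PySem.List.pyRange 0 (t : Int) 1 ++ [(t : Int)] := by
        exact PySem.List.pyRange_one_succ_right (by omega)
      have hcast : ((t + 1 : Nat) : Int) = (t : Int) + 1 := by push_cast; ring
      rw [hcast, hsplit, List.foldl_append, hfold]
      simp only [List.foldl_cons, List.foldl_nil]
      by_cases hgt : PySem.List.pyGetD nums (t : Int) 0 > PySem.List.pyGetD nums (mn : Int) 0
      · refine ⟨t, by rw [if_pos hgt], by omega, ?_⟩
        intro j hj
        simp only [PySem.List.pyGetD_natCast] at hgt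
        rcases Nat.lt_succ_iff_lt_or_eq.mp hj with h | h
        · exact le_of_lt (lt_of_le_of_lt (hdom j h) hgt)
        · subst h; exact le_refl _
      · refine ⟨mn, by rw [if_neg hgt], by omega, ?_⟩
        intro j hj
        simp only [PySem.List.pyGetD_natCast, not_lt] at hgt
        rcases Nat.lt_succ_iff_lt_or_eq.mp hj with h | h
        · exact hdom j h
        · subst h; exact hgt
    · have ht0 : t = 0 := by omega
      subst ht0
      refine ⟨0, ?_, by omega, by intro j hj; interval_cases j; exact le_refl _⟩
      rw [show ((1 : Nat) : Int) = 0 + 1 by ring, PySem.List.pyRange_one_singleton]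
      simp

-- getD of an in-range index is a member of a long-enough take
lemma getD_mem_take {nums : List Int} {j p : Nat} (hj : j < p) (hlen : j < nums.length) :
    nums.getD j 0 ∈ nums.take p := by
  have h1 : j < (nums.take p).length := by simp [List.length_take]; omega
  have h2 : (nums.take p)[j] = nums[j] := List.getElem_take
  have h3 : nums.getD j 0 = nums[j] := List.getD_eq_getElem nums 0 hlen
  rw [h3, ← h2]
  exact List.getElem_mem h1

lemma mem_take_getD {nums : List Int} {p : Nat} {y : Int} (hy : y ∈ nums.take p) :
    ∃ j : Nat, j < p ∧ j < nums.length ∧ y = nums.getD j 0 := by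
  obtain ⟨j, hj, hval⟩ := List.getElem_of_mem hy
  have hjl : j < nums.length := by
    have := hj; simp [List.length_take] at this; omega
  have hjp : j < p := by
    have := hj; simp [List.length_take] at this; omega
  exact ⟨j, hjp, hjl, by rw [← hval, List.getElem_take, List.getD_eq_getElem nums 0 hjl]⟩

-- ===== VERDICT (by name: the statement is the Claim_ definition above) =====
theorem maximumTop_spec : Claim_equal_maximumTop := by
  intro nums k _ hpre
  unfold Spec_maximumTop maximumTop maximumTop_alt
  by_cases h1 : nums.length = 1
  · simp [h1]
  by_cases h2 : k < 2
  · simp [h1, h2]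
  simp only [if_neg h1, if_neg h2]
  -- main case: len ≥ 2, k ≥ 2
  have hk2 : 2 ≤ k := by omega
  have hne : nums ≠ [] := hpre.1
  have hn2 : 2 ≤ nums.length := by
    cases nums with
    | nil => exact absurd rfl hne
    | cons a t => cases t with
      | nil => simp at h1
      | cons b u => simp
  set n := nums.length with hn
  obtain ⟨kn, hkn⟩ : ∃ kn : Nat, k = (kn : Int) := ⟨k.toNat, by omega⟩
  have hkn2 : 2 ≤ kn := by omega
  -- the slice lengths
  have hslice : PySem.List.slice nums none (some k) = nums.take kn := by
    rw [hkn]; exact PySem.List.slice_to_natCast nums kn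
  have hsm1 : PySem.List.slice nums (some 0) (some (k - 1)) = nums.take (kn - 1) := by
    rw [hkn, PySem.List.slice_zero_start,
      show ((kn : Int) - 1) = ((kn - 1 : Nat) : Int) by omega]
    exact PySem.List.slice_to_natCast nums (kn - 1)
  have hsp1 : PySem.List.slice nums (some 0) (some (k + 1)) = nums.take (kn + 1) := by
    rw [hkn, PySem.List.slice_zero_start,
      show ((kn : Int) + 1) = ((kn + 1 : Nat) : Int) by push_cast; ring]
    exact PySem.List.slice_to_natCast nums (kn + 1)
  set t : Nat := min kn n with htdef
  have hlen2 : ((PySem.List.slice nums none (some k)).length : Int) = ((t : Nat) : Int) := by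
    rw [hslice, List.length_take, ← hn]
  have ht0 : 0 < t := by omega
  have htn : t ≤ n := by omega
  obtain ⟨mn, hfold, hmnt, hdom⟩ := argmax_spec nums t ht0
  rw [hlen2, hfold, hsm1, hsp1]
  by_cases hbr : (mn : Int) + 1 = k
  · -- A's argmax-at-top branch: both sides perform the identical final comparison
    rw [if_pos hbr]
  · -- A's else branch: max over nums[:k+1]
    rw [if_neg hbr]
    have hmn_ne : mn + 1 ≠ kn := by intro h; apply hbr; omega
    have htake_ne1 : nums.take (kn - 1) ≠ [] := by
      have : 0 < (nums.take (kn - 1)).length := by simp [List.length_take]; omega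
      exact List.ne_nil_of_length_pos this
    have htake_ne2 : nums.take (kn + 1) ≠ [] := by
      have : 0 < (nums.take (kn + 1)).length := by simp [List.length_take]; omega
      exact List.ne_nil_of_length_pos this
    -- every element of nums[:k+1] is ≤ B's value
    have hB : ∀ y ∈ nums.take (kn + 1),
        y ≤ (if k < (n : Int) then max (pvM (nums.take (kn - 1))) (PySem.List.pyGetD nums k 0)
             else pvM (nums.take (kn - 1))) := by
      intro y hy
      obtain ⟨j, hjp, hjl, hyv⟩ := mem_take_getD hy
      subst hyv
      by_cases hjk : j < kn - 1
      · have : nums.getD j 0 ≤ pvM (nums.take (kn - 1)) := pvM_le (getD_mem_take hjk hjl)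
        split_ifs with hc
        · exact le_trans this (le_max_left _ _)
        · exact this
      by_cases hjk2 : j = kn
      · subst hjk2
        have hc : k < (n : Int) := by omega
        rw [if_pos hc, hkn, PySem.List.pyGetD_natCast]
        exact le_max_right _ _
      · -- j = kn - 1: dominated by nums[mn], which lies inside nums[:k-1]
        have hjlt : j < t := by omega
        have hmn_lt : mn < kn - 1 := by omega
        have hmn_len : mn < n := by omega
        have hd1 : nums.getD j 0 ≤ nums.getD mn 0 := hdom j hjlt
        have hd2 : nums.getD mn 0 ≤ pvM (nums.take (kn - 1)) :=
          pvM_le (getD_mem_take hmn_lt hmn_len)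
        split_ifs with hc
        · exact le_trans (le_trans hd1 hd2) (le_max_left _ _)
        · exact le_trans hd1 hd2
    have hle1 : pvM (nums.take (kn + 1))
        ≤ (if k < (n : Int) then max (pvM (nums.take (kn - 1))) (PySem.List.pyGetD nums k 0)
           else pvM (nums.take (kn - 1))) := hB _ (pvM_mem htake_ne2)
    have hsub : ∀ y ∈ nums.take (kn - 1), y ∈ nums.take (kn + 1) := by
      intro y hy
      obtain ⟨j, hjp, hjl, hyv⟩ := mem_take_getD hy
      subst hyv
      exact getD_mem_take (by omega) hjl
    have hle2 : (if k < (n : Int) then max (pvM (nums.take (kn - 1))) (PySem.List.pyGetD nums k 0)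
           else pvM (nums.take (kn - 1))) ≤ pvM (nums.take (kn + 1)) := by
      have hm1 : pvM (nums.take (kn - 1)) ≤ pvM (nums.take (kn + 1)) :=
        pvM_le (hsub _ (pvM_mem htake_ne1))
      split_ifs with hc
      · refine max_le hm1 ?_
        rw [hkn, PySem.List.pyGetD_natCast]
        exact pvM_le (getD_mem_take (by omega) (by omega))
      · exact hm1
    simpa [pvM] using le_antisymm hle1 hle2
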